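-- pv_equiv track=rewrite | github.com/Andrew-Ver/Advent-of-Code-Solutions | 2015/day-18/day-18.py | update_lights_on_part_two
-- ===== SOURCE A (Python) =====
-- def neighbours_that_are_on(on_lights: set, light_y: int, light_x: int) -> int:
-- 	#neighbour lights which intersect with lights already on
-- 	return len(on_lights.intersection({(light_y-1, light_x), (light_y, light_x+1), (light_y+1, light_x), (light_y, light_x-1), (light_y-1, light_x+1), (light_y+1, light_x+1), (light_y+1, light_x-1), (light_y-1, light_x-1)}))
--
-- four_corners = {(0, 99), (99, 0), (99, 99), (0, 0)}
--
-- def update_lights_on_part_two(on_lights: set, four_corners=four_corners) -> set: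
-- 	new_on_lights = set()
-- 	new_on_lights.update(four_corners)
-- 	#The lights in the 4 corners must always stay on for Part Two
-- 	for y, x in {(y, x) for y in range(0, 100) for x in range(0, 100) if (y, x) not in four_corners}:
-- 		if (y, x) in on_lights:
-- 			if neighbours_that_are_on(on_lights, y, x) in [2, 3]:
-- 				new_on_lights.add((y, x))
-- 		else:
-- 			if neighbours_that_are_on(on_lights, y, x) == 3:
-- 				new_on_lights.add((y, x))
-- 	return new_on_lights
-- ===== SOURCE B (Python) =====
-- four_corners = {(0, 99), (99, 0), (99, 99), (0, 0)}
--
-- OFFSETS = [(-1, -1), (-1, 0), (-1, 1), (0, -1), (0, 1), (1, -1), (1, 0), (1, 1)]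
--
-- def update_lights_on_part_two(on_lights: set, four_corners=four_corners) -> set:
-- 	# scatter: count each live cell's contribution into its 8 neighbours once,
-- 	# then read the counts back in a single grid pass
-- 	counts = {}
-- 	for (y, x) in on_lights:
-- 		for (dy, dx) in OFFSETS:
-- 			k = (y + dy, x + dx)
-- 			counts[k] = counts.get(k, 0) + 1
-- 	new_on_lights = set(four_corners)
-- 	for y in range(100):
-- 		for x in range(100):
-- 			if (y, x) in four_corners:
-- 				continue
-- 			c = counts.get((y, x), 0)
-- 			if c == 3 or (c == 2 and (y, x) in on_lights):
-- 				new_on_lights.add((y, x))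
-- 	return new_on_lights
-- ===== Notes on version B (the rewrite author's own statement) =====
-- stated objective: alternative
-- what changed: B replaces A's per-cell gather (intersecting each grid cell's 8-neighbour set with on_lights, 10000 times) by a single scatter pass that builds a neighbour-count dictionary from the live cells and then reads counts off in one grid sweep.
import Mathlib
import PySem

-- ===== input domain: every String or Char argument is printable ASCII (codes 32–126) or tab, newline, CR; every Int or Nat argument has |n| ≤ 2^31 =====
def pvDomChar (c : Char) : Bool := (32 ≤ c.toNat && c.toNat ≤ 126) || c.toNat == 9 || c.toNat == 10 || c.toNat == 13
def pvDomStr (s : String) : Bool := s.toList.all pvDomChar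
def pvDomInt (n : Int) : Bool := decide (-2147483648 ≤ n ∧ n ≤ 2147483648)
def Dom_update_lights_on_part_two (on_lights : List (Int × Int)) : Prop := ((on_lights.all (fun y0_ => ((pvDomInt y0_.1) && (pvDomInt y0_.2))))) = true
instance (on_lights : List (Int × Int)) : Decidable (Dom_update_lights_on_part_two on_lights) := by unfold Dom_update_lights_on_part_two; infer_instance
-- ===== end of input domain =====

-- B replaces A's per-cell gather (intersecting each cell's 8-neighbour set with on_lights)
-- by one scatter pass building a neighbour counter from the live cells, then a single grid
-- read-off; alternative decomposition, same result.

-- ===== PORT A =====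
def four_corners : PySem.Set (Int × Int) := PySem.Set.ofList [(0, 99), (99, 0), (99, 99), (0, 0)]

def neighbours_that_are_on (on_lights : PySem.Set (Int × Int)) (light_y light_x : Int) : Int :=
  PySem.Set.len (PySem.Set.inter on_lights (PySem.Set.ofList
    [(light_y - 1, light_x), (light_y, light_x + 1), (light_y + 1, light_x), (light_y, light_x - 1),
     (light_y - 1, light_x + 1), (light_y + 1, light_x + 1), (light_y + 1, light_x - 1),
     (light_y - 1, light_x - 1)]))

def update_lights_on_part_two (on_lights : List (Int × Int)) : List (Int × Int) :=
  let new_on_lights : List (Int × Int) := PySem.Set.update PySem.Set.empty four_corners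
  let cells : List (Int × Int) :=
    PySem.Set.ofList ((PySem.List.pyRange 0 100 1).flatMap (fun y =>
      ((PySem.List.pyRange 0 100 1).map (fun x => ((y, x) : Int × Int))).filter
        (fun c => !(PySem.Set.contains four_corners c))))
  List.foldl
    (fun s c =>
      if PySem.Set.contains on_lights c then
        if ([2, 3] : List Int).contains (neighbours_that_are_on on_lights c.1 c.2) then
          PySem.Set.add s c else s
      else
        if neighbours_that_are_on on_lights c.1 c.2 == 3 then PySem.Set.add s c else s)
    new_on_lights cells

-- ===== PORT B =====
def OFFSETS : List (Int × Int) :=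
  [(-1, -1), (-1, 0), (-1, 1), (0, -1), (0, 1), (1, -1), (1, 0), (1, 1)]

def update_lights_on_part_two_alt (on_lights : List (Int × Int)) : List (Int × Int) :=
  let counts : PySem.Dict (Int × Int) Int :=
    on_lights.foldl (fun d p =>
      OFFSETS.foldl (fun d o =>
        d.insert (p.1 + o.1, p.2 + o.2) (d.getD (p.1 + o.1, p.2 + o.2) 0 + 1)) d)
      PySem.Dict.empty
  let new_on_lights : List (Int × Int) := PySem.Set.ofList four_corners
  List.foldl (fun s y =>
    List.foldl (fun s x =>
      if PySem.Set.contains four_corners (y, x) then s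
      else
        if counts.getD (y, x) 0 == 3
            || (counts.getD (y, x) 0 == 2 && PySem.Set.contains on_lights (y, x)) then
          PySem.Set.add s (y, x) else s)
      s (PySem.List.pyRange 0 100 1))
    new_on_lights (PySem.List.pyRange 0 100 1)

-- ===== PRECONDITION & SPEC =====
def Spec_update_lights_on_part_two (on_lights : List (Int × Int)) (out : List (Int × Int)) : Prop := out = update_lights_on_part_two_alt on_lights
instance (on_lights : List (Int × Int)) (out : List (Int × Int)) : Decidable (Spec_update_lights_on_part_two on_lights out) := by unfold Spec_update_lights_on_part_two; infer_instance

-- ===== CLAIM (what is proved, stated in full; the proofs are below) =====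
def Claim_equal_update_lights_on_part_two : Prop := ∀ (on_lights : List (Int × Int)), Dom_update_lights_on_part_two on_lights → Spec_update_lights_on_part_two on_lights (update_lights_on_part_two on_lights)

-- ===== LEMMAS AND PROOFS =====

-- A's 8-neighbour list of a cell c (exactly the literal inside neighbours_that_are_on)
def pvNbr (c : Int × Int) : List (Int × Int) :=
  [(c.1 - 1, c.2), (c.1, c.2 + 1), (c.1 + 1, c.2), (c.1, c.2 - 1),
   (c.1 - 1, c.2 + 1), (c.1 + 1, c.2 + 1), (c.1 + 1, c.2 - 1), (c.1 - 1, c.2 - 1)]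

-- the 8 cells B's scatter pass increments for a live cell p
def pvKeys (p : Int × Int) : List (Int × Int) := OFFSETS.map (fun o => (p.1 + o.1, p.2 + o.2))

lemma pvKeys_nodup (p : Int × Int) : (pvKeys p).Nodup := by
  apply List.Nodup.map
  · intro a b h
    have h1 : p.1 + a.1 = p.1 + b.1 := congrArg Prod.fst h
    have h2 : p.2 + a.2 = p.2 + b.2 := congrArg Prod.snd h
    exact Prod.ext (by omega) (by omega)
  · decide

lemma pvKeys_mem_iff (p c : Int × Int) : c ∈ pvKeys p ↔ p ∈ pvNbr c := by
  obtain ⟨py, px⟩ := p; obtain ⟨cy, cx⟩ := c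
  simp [pvKeys, pvNbr, OFFSETS, Prod.ext_iff]
  omega

lemma counts_getD (l : List (Int × Int)) (d : PySem.Dict (Int × Int) Int) (c : Int × Int) :
    (l.foldl (fun d p =>
        OFFSETS.foldl (fun d o =>
          d.insert (p.1 + o.1, p.2 + o.2) (d.getD (p.1 + o.1, p.2 + o.2) 0 + 1)) d) d).getD c 0
      = d.getD c 0 + ((l.filter (fun p => (pvNbr c).contains p)).length : Int) := by
  induction l generalizing d with
  | nil => simp
  | cons p l ih =>
    rw [List.foldl_cons, ih]
    have hinner : OFFSETS.foldl (fun d o =>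
          d.insert (p.1 + o.1, p.2 + o.2) (d.getD (p.1 + o.1, p.2 + o.2) 0 + 1)) d
        = (pvKeys p).foldl (fun d k => d.insert k (d.getD k 0 + 1)) d := by
      rw [pvKeys, List.foldl_map]
    rw [hinner, PySem.Dict.getD_foldl_insert_add_one]
    rw [List.filter_cons]
    by_cases hm : p ∈ pvNbr c
    · have hc : c ∈ pvKeys p := (pvKeys_mem_iff p c).mpr hm
      rw [List.count_eq_one_of_mem (pvKeys_nodup p) hc]
      simp only [List.contains_iff_mem, hm]
      simp
      ring
    · have hc : c ∉ pvKeys p := fun h => hm ((pvKeys_mem_iff p c).mp h)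
      rw [List.count_eq_zero_of_not_mem hc]
      simp only [List.contains_iff_mem, hm]
      simp

lemma A_count (on_lights : List (Int × Int)) (c : Int × Int) :
    neighbours_that_are_on on_lights c.1 c.2
      = ((on_lights.filter (fun p => (pvNbr c).contains p)).length : Int) := by
  unfold neighbours_that_are_on PySem.Set.len PySem.Set.inter
  congr 2
  apply List.filter_congr
  intro x _
  by_cases h : x ∈ pvNbr c
  · simp [PySem.Set.mem_ofList, pvNbr] at *
  · simp [PySem.Set.mem_ofList, pvNbr] at *

lemma foldl_add_nodup {α : Type} [BEq α] [LawfulBEq α] :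
    ∀ (xs acc : List α), (acc ++ xs).Nodup → List.foldl PySem.Set.add acc xs = acc ++ xs := by
  intro xs
  induction xs with
  | nil => intro acc _; simp
  | cons x xs ih =>
    intro acc hacc
    have hx : x ∉ acc := by
      intro hmem
      exact (List.disjoint_of_nodup_append hacc) hmem (List.mem_cons_self)
    rw [List.foldl_cons]
    have hadd : PySem.Set.add acc x = acc ++ [x] := by
      unfold PySem.Set.add
      rw [if_neg (by simpa [PySem.Set.contains_iff] using hx)]
    rw [hadd]
    have := ih (acc ++ [x]) (by simpa using hacc)
    simpa using this

lemma set_ofList_nodup {α : Type} [BEq α] [LawfulBEq α] (xs : List α) (h : xs.Nodup) :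
    PySem.Set.ofList xs = xs := by
  simpa using foldl_add_nodup xs [] (by simpa using h)

-- ===== VERDICT (by name: the statement is the Claim_ definition above) =====
theorem update_lights_on_part_two_spec : Claim_equal_update_lights_on_part_two := by
  intro on_lights _
  unfold Spec_update_lights_on_part_two
  unfold update_lights_on_part_two update_lights_on_part_two_alt
  dsimp only
  have hinit : (PySem.Set.update PySem.Set.empty four_corners : List (Int × Int))
      = PySem.Set.ofList four_corners := by decide
  have hn : ∀ c : Int × Int,
      (on_lights.foldl (fun d p => OFFSETS.foldl (fun d o =>
          d.insert (p.1 + o.1, p.2 + o.2) (d.getD (p.1 + o.1, p.2 + o.2) 0 + 1)) d)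
        PySem.Dict.empty).getD c 0 = neighbours_that_are_on on_lights c.1 c.2 := by
    intro c
    rw [counts_getD, A_count on_lights c]
    simp [pysem]
  have hflat : ((PySem.List.pyRange 0 100 1).flatMap (fun y =>
        ((PySem.List.pyRange 0 100 1).map (fun x => ((y, x) : Int × Int))).filter
          (fun c => !(PySem.Set.contains four_corners c))))
      = ((PySem.List.pyRange 0 100 1).flatMap (fun y =>
          (PySem.List.pyRange 0 100 1).map (fun x => ((y, x) : Int × Int)))).filter
          (fun c => !(PySem.Set.contains four_corners c)) := by
    rw [List.filter_flatMap]
  rw [hflat]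
  have hRnodup : (PySem.List.pyRange 0 100 1).Nodup := by decide
  have hnodup : (((PySem.List.pyRange 0 100 1).flatMap (fun y =>
      (PySem.List.pyRange 0 100 1).map (fun x => ((y, x) : Int × Int)))).filter
      (fun c => !(PySem.Set.contains four_corners c))).Nodup := by
    apply List.Nodup.filter
    exact List.Nodup.product hRnodup hRnodup
  rw [set_ofList_nodup _ hnodup, List.foldl_filter, hinit, List.foldl_flatMap]
  simp only [List.foldl_map]
  apply List.foldl_ext
  intro s y hy
  apply List.foldl_ext
  intro s x hx
  have hn' : (on_lights.foldl (fun d p => OFFSETS.foldl (fun d o =>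
        d.insert (p.1 + o.1, p.2 + o.2) (d.getD (p.1 + o.1, p.2 + o.2) 0 + 1)) d)
      PySem.Dict.empty).getD (y, x) 0 = neighbours_that_are_on on_lights y x := by
    simpa using hn (y, x)
  by_cases hcorner : ((y, x) : Int × Int) ∈ four_corners
  · simp [hcorner]
  · by_cases hon : ((y, x) : Int × Int) ∈ on_lights <;>
      by_cases h2 : neighbours_that_are_on on_lights y x = 2 <;>
      by_cases h3 : neighbours_that_are_on on_lights y x = 3 <;>
      simp [hcorner, hon, h2, h3, hn']
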